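-- pv_equiv track=rewrite | github.com/Sayee97/Halma-Game-playing-agent- | halma.py | jumpInfi
-- ===== SOURCE A (Python) =====
-- def jumpInfi(x,y,prevSpots,goal,terrain):
-- 	possiblititiesR=[1,1,1,0,0,-1,-1,-1]
-- 	possibilitiesC=[1,0,-1,1,-1,1,0,-1]
--
-- 	jumps=[]
-- 	i=0
-- 	for i in range(8):
-- 		xChild=x+possiblititiesR[i]
-- 		yChild=y+possibilitiesC[i]
-- 		if xChild>=0 and xChild<=15 and yChild>=0 and yChild<=15:
-- 			if terrain[yChild][xChild]!='.':
-- 				m=x+(possiblititiesR[i]*2)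
-- 				n=y+(possibilitiesC[i]*2)
-- 				if m>=0 and m<=15 and n>=0 and n<=15:
-- 					if terrain[n][m]=='.'  and [m,n] not in prevSpots: #and [n,m] not in goal
-- 						jumps.append([m,n])
-- 						prevSpots.append([x,y])
-- 						future_hops=jumpInfi(m,n,prevSpots,goal,terrain)
--
-- 						jumps.extend(future_hops)
-- 	return jumps
-- ===== SOURCE B (Python) =====
-- def jumpInfi(x, y, prevSpots, goal, terrain):
--     # Iterative DFS: explicit stack of (x, y, next-direction-index) frames instead of recursion.
--     DIRS = [(1, 1), (1, 0), (1, -1), (0, 1), (0, -1), (-1, 1), (-1, 0), (-1, -1)]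
--     jumps = []
--     stack = [(x, y, 0)]
--     while stack:
--         cx, cy, i = stack.pop()
--         while i < 8:
--             dr, dc = DIRS[i]
--             i += 1
--             ox, oy = cx + dr, cy + dc
--             if 0 <= ox <= 15 and 0 <= oy <= 15 and terrain[oy][ox] != '.':
--                 m, n = cx + 2 * dr, cy + 2 * dc
--                 if 0 <= m <= 15 and 0 <= n <= 15 and terrain[n][m] == '.' and [m, n] not in prevSpots:
--                     jumps.append([m, n])
--                     prevSpots.append([cx, cy])
--                     stack.append((cx, cy, i))
--                     cx, cy, i = m, n, 0
--     return jumps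
-- ===== Notes on version B (the rewrite author's own statement) =====
-- stated objective: alternative
-- what changed: A's recursive DFS is replaced by an iterative DFS driven by an explicit stack of (x, y, next-direction-index) frames, preserving A's pre-order jump list and the interleaved prevSpots appends.
-- outside the precondition, e.g. on jumpInfi(0, 0, [], [], [['.', '.'], ['.', '.']]): A returns [], B returns []
import Mathlib
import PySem

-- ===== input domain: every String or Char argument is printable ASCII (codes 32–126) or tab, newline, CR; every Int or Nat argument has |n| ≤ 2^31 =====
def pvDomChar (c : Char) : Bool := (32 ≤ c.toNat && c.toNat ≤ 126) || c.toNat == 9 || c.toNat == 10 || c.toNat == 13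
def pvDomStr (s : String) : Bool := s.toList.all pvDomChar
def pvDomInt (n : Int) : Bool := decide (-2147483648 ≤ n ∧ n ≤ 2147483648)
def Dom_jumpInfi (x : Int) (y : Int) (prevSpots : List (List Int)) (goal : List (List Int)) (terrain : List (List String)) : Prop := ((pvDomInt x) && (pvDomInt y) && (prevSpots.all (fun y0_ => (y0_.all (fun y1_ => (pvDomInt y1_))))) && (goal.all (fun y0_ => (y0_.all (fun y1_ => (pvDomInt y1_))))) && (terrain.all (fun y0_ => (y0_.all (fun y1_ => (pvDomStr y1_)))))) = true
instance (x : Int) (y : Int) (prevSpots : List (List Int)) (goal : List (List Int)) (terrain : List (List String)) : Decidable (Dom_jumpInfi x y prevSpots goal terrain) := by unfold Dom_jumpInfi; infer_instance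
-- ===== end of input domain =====

-- B replaces A's recursive DFS by an iterative DFS over an explicit stack of (x, y, next-direction)
-- frames (objective: alternative decomposition, same cost). Both Pythons mutate prevSpots identically
-- (same appends in the same order); the equivalence proved here is about the RETURN value.

-- ===== PORT A =====
-- A's two direction tables.
def pvDirR : List Int := [1, 1, 1, 0, 0, -1, -1, -1]
def pvDirC : List Int := [1, 0, -1, 1, -1, 1, 0, -1]

-- terrain[r][c]; under Pre_ every access performed by either Python is in range, so the
-- fallback "." of this total version is never the value actually used there.
def pvCell (terrain : List (List String)) (r c : Int) : String :=
  (PySem.List.pyGet? ((PySem.List.pyGet? terrain r).getD []) c).getD "."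

-- One step of A's guard chain at direction index i (shared verbatim by both ports):
-- `some (m, n)` exactly when all four nested Python conditions pass.
def pvStep? (x y : Int) (i : Nat) (prev : List (List Int)) (terrain : List (List String)) :
    Option (Int × Int) :=
  let dr := pvDirR.getD i 0
  let dc := pvDirC.getD i 0
  let xChild := x + dr
  let yChild := y + dc
  if 0 ≤ xChild ∧ xChild ≤ 15 ∧ 0 ≤ yChild ∧ yChild ≤ 15 then
    if pvCell terrain yChild xChild ≠ "." then
      let m := x + dr * 2
      let n := y + dc * 2
      if 0 ≤ m ∧ m ≤ 15 ∧ 0 ≤ n ∧ n ≤ 15 then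
        if pvCell terrain n m = "." ∧ [m, n] ∉ prev then some (m, n) else none
      else none
    else none
  else none

-- number of board cells (0..15)² not yet recorded in prev: the termination measure.
def pvFree (prev : List (List Int)) : Nat :=
  ((Finset.range 16 ×ˢ Finset.range 16).filter
    (fun c => [(c.1 : Int), (c.2 : Int)] ∉ prev)).card

lemma pvFree_le_of_subset {L L' : List (List Int)} (h : ∀ a, a ∈ L → a ∈ L') :
    pvFree L' ≤ pvFree L := by
  apply Finset.card_le_card
  intro c hc
  simp only [Finset.mem_filter] at hc ⊢
  exact ⟨hc.1, fun hm => hc.2 (h _ hm)⟩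

lemma pvFree_lt (L : List (List Int)) {a b : Int}
    (ha : 0 ≤ a ∧ a ≤ 15 ∧ 0 ≤ b ∧ b ≤ 15) (hnm : [a, b] ∉ L) :
    pvFree (L ++ [[a, b]]) < pvFree L := by
  apply Finset.card_lt_card
  rw [Finset.ssubset_iff_of_subset]
  · refine ⟨(a.toNat, b.toNat), ?_, ?_⟩
    · simp only [Finset.mem_filter, Finset.mem_product, Finset.mem_range]
      refine ⟨⟨by omega, by omega⟩, ?_⟩
      have h1 : ((a.toNat : Int)) = a := by omega
      have h2 : ((b.toNat : Int)) = b := by omega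
      rw [h1, h2]; exact hnm
    · simp only [Finset.mem_filter, Finset.mem_product, Finset.mem_range, not_and, not_not]
      intro _
      have h1 : ((a.toNat : Int)) = a := by omega
      have h2 : ((b.toNat : Int)) = b := by omega
      rw [h1, h2]
      simp
  · intro c hc
    simp only [Finset.mem_filter, List.mem_append] at hc ⊢
    exact ⟨hc.1, fun hm => hc.2 (Or.inl hm)⟩

lemma pvDir_ne_zero : ∀ i, i < 8 → ¬(pvDirR.getD i 0 = 0 ∧ pvDirC.getD i 0 = 0) := by decide

lemma pvStep?_some {x y : Int} {i : Nat} {prev : List (List Int)}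
    {terrain : List (List String)} {m n : Int} (hi : i < 8)
    (hs : pvStep? x y i prev terrain = some (m, n)) :
    (0 ≤ m ∧ m ≤ 15 ∧ 0 ≤ n ∧ n ≤ 15) ∧ [m, n] ∉ prev ++ [[x, y]] := by
  simp only [pvStep?] at hs
  split_ifs at hs with h1 h2 h3 h4
  · obtain ⟨rfl, rfl⟩ : x + pvDirR.getD i 0 * 2 = m ∧ y + pvDirC.getD i 0 * 2 = n := by
      injection hs with h; exact ⟨congrArg Prod.fst h, congrArg Prod.snd h⟩
    refine ⟨h3, ?_⟩
    intro hmem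
    rcases List.mem_append.mp hmem with hmem | hmem
    · exact h4.2 hmem
    · have hxy := List.mem_singleton.mp hmem
      have hne := pvDir_ne_zero i hi
      have h5 : x + pvDirR.getD i 0 * 2 = x ∧ y + pvDirC.getD i 0 * 2 = y := by
        simpa using hxy
      omega

-- A's body: the `for i in range(8)` loop, entered at index i, as structural recursion.
-- Returns (jumps, delta) where delta is the list of elements A appends to prevSpots.
def jmLoop (i : Nat) (x y : Int) (prev : List (List Int)) (terrain : List (List String)) :
    List (List Int) × List (List Int) :=
  if hi : i < 8 then
    match hs : pvStep? x y i prev terrain with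
    | some (m, n) =>
        let child := jmLoop 0 m n (prev ++ [[x, y]]) terrain
        let rest := jmLoop (i + 1) x y (prev ++ [[x, y]] ++ child.2) terrain
        ([[m, n]] ++ child.1 ++ rest.1, [[x, y]] ++ child.2 ++ rest.2)
    | none => jmLoop (i + 1) x y prev terrain
  else ([], [])
termination_by (pvFree (prev ++ [[x, y]]), 8 - i)
decreasing_by
  · apply Prod.Lex.left
    have h := pvStep?_some hi hs
    exact pvFree_lt _ h.1 h.2
  · have hle : pvFree (prev ++ [[x, y]] ++ child.2 ++ [[x, y]]) ≤ pvFree (prev ++ [[x, y]]) := by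
      apply pvFree_le_of_subset
      intro a ha
      simp only [List.append_assoc, List.mem_append] at ha ⊢
      tauto
    rcases lt_or_eq_of_le hle with hlt | heq
    · exact Prod.Lex.left _ _ hlt
    · rw [heq]; exact Prod.Lex.right _ (by omega)
  · exact Prod.Lex.right _ (by omega)

def jumpInfi (x : Int) (y : Int) (prevSpots : List (List Int)) (goal : List (List Int)) (terrain : List (List String)) : List (List Int) :=
  (jmLoop 0 x y prevSpots terrain).1

-- ===== PORT B =====
-- B's while-loop as a step machine: frames (cx, cy, i); fuel is only a totality guard
-- (pvCost_le below shows the machine halts long before pvFuel runs out).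
def runB (fuel : Nat) (stack : List (Int × Int × Nat)) (prev : List (List Int))
    (jumps : List (List Int)) (terrain : List (List String)) : List (List Int) :=
  match fuel, stack with
  | 0, _ => jumps
  | _ + 1, [] => jumps
  | f + 1, (cx, cy, i) :: rest =>
      if i < 8 then
        match pvStep? cx cy i prev terrain with
        | some (m, n) =>
            runB f ((m, n, 0) :: (cx, cy, i + 1) :: rest) (prev ++ [[cx, cy]])
              (jumps ++ [[m, n]]) terrain
        | none => runB f ((cx, cy, i + 1) :: rest) prev jumps terrain
      else runB f rest prev jumps terrain

def pvFuel : Nat := 9 * 10 ^ 256 + 1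

def jumpInfi_alt (x : Int) (y : Int) (prevSpots : List (List Int)) (goal : List (List Int)) (terrain : List (List String)) : List (List Int) :=
  runB pvFuel [(x, y, 0)] prevSpots [] terrain

-- ===== PRECONDITION & SPEC =====
-- Pre_ excludes inputs where (x,y) is within one step of the 16×16 board but terrain is smaller
-- than 16×16: there A's chain of terrain[..][..] accesses can raise IndexError mid-recursion
-- (and a few such undersized boards on which A happens to return, e.g. all-'.' ones, are
-- excluded with them, since which accesses occur depends on the cell contents).
def Pre_jumpInfi (x : Int) (y : Int) (prevSpots : List (List Int)) (goal : List (List Int)) (terrain : List (List String)) : Prop :=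
  (x < -1 ∨ 16 < x ∨ y < -1 ∨ 16 < y) ∨
  (16 ≤ terrain.length ∧ ∀ row ∈ terrain.take 16, 16 ≤ row.length)
instance (x : Int) (y : Int) (prevSpots : List (List Int)) (goal : List (List Int)) (terrain : List (List String)) : Decidable (Pre_jumpInfi x y prevSpots goal terrain) := by unfold Pre_jumpInfi; infer_instance

def pvWitness_jumpInfi : Int × Int × List (List Int) × List (List Int) × List (List String) :=
  (20, 20, [], [], [])

def Spec_jumpInfi (x : Int) (y : Int) (prevSpots : List (List Int)) (goal : List (List Int)) (terrain : List (List String)) (out : List (List Int)) : Prop := out = jumpInfi_alt x y prevSpots goal terrain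
instance (x : Int) (y : Int) (prevSpots : List (List Int)) (goal : List (List Int)) (terrain : List (List String)) (out : List (List Int)) : Decidable (Spec_jumpInfi x y prevSpots goal terrain out) := by unfold Spec_jumpInfi; infer_instance

-- ===== CLAIM (what is proved, stated in full; the proofs are below) =====
def Claim_equal_jumpInfi : Prop := ∀ (x : Int) (y : Int) (prevSpots : List (List Int)) (goal : List (List Int)) (terrain : List (List String)), Dom_jumpInfi x y prevSpots goal terrain → Pre_jumpInfi x y prevSpots goal terrain → Spec_jumpInfi x y prevSpots goal terrain (jumpInfi x y prevSpots goal terrain)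

-- ===== LEMMAS AND PROOFS =====

-- number of machine transitions runB needs to clear the frame (x, y, i) (proof-side only).
def pvCost (i : Nat) (x y : Int) (prev : List (List Int)) (terrain : List (List String)) : Nat :=
  if hi : i < 8 then
    match hs : pvStep? x y i prev terrain with
    | some (m, n) =>
        let child := jmLoop 0 m n (prev ++ [[x, y]]) terrain
        1 + pvCost 0 m n (prev ++ [[x, y]]) terrain +
          pvCost (i + 1) x y (prev ++ [[x, y]] ++ child.2) terrain
    | none => 1 + pvCost (i + 1) x y prev terrain
  else 1
termination_by (pvFree (prev ++ [[x, y]]), 8 - i)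
decreasing_by
  · apply Prod.Lex.left
    have h := pvStep?_some hi hs
    exact pvFree_lt _ h.1 h.2
  · have hle : pvFree (prev ++ [[x, y]] ++ child.2 ++ [[x, y]]) ≤ pvFree (prev ++ [[x, y]]) := by
      apply pvFree_le_of_subset
      intro a ha
      simp only [List.append_assoc, List.mem_append] at ha ⊢
      tauto
    rcases lt_or_eq_of_le hle with hlt | heq
    · exact Prod.Lex.left _ _ hlt
    · rw [heq]; exact Prod.Lex.right _ (by omega)
  · exact Prod.Lex.right _ (by omega)

lemma runB_empty (f : Nat) (prev jumps : List (List Int)) (terrain : List (List String)) :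
    runB f [] prev jumps terrain = jumps := by
  cases f <;> rfl

-- running the machine on frame (x,y,i) with enough fuel clears the frame exactly as
-- A's loop jmLoop does, then continues with the rest of the stack.
lemma jmLoop_eq_some {i : Nat} {x y m n : Int} {prev : List (List Int)}
    {terrain : List (List String)} (hi : i < 8)
    (hs : pvStep? x y i prev terrain = some (m, n)) :
    jmLoop i x y prev terrain =
      ([[m, n]] ++ (jmLoop 0 m n (prev ++ [[x, y]]) terrain).1 ++
        (jmLoop (i + 1) x y (prev ++ [[x, y]] ++ (jmLoop 0 m n (prev ++ [[x, y]]) terrain).2)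
          terrain).1,
       [[x, y]] ++ (jmLoop 0 m n (prev ++ [[x, y]]) terrain).2 ++
        (jmLoop (i + 1) x y (prev ++ [[x, y]] ++ (jmLoop 0 m n (prev ++ [[x, y]]) terrain).2)
          terrain).2) := by
  rw [jmLoop]
  simp only [dif_pos hi]
  split <;> simp_all

lemma jmLoop_eq_none {i : Nat} {x y : Int} {prev : List (List Int)}
    {terrain : List (List String)} (hi : i < 8)
    (hs : pvStep? x y i prev terrain = none) :
    jmLoop i x y prev terrain = jmLoop (i + 1) x y prev terrain := by
  rw [jmLoop]
  simp only [dif_pos hi]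
  split <;> simp_all

lemma jmLoop_eq_stop {i : Nat} {x y : Int} {prev : List (List Int)}
    {terrain : List (List String)} (hi : ¬ i < 8) :
    jmLoop i x y prev terrain = ([], []) := by
  rw [jmLoop]
  simp only [dif_neg hi]

lemma runB_bridge (i : Nat) (x y : Int) (prev : List (List Int)) (terrain : List (List String)) :
    ∀ (f : Nat) (rest : List (Int × Int × Nat)) (jumps : List (List Int)),
      runB (pvCost i x y prev terrain + f) ((x, y, i) :: rest) prev jumps terrain =
        runB f rest (prev ++ (jmLoop i x y prev terrain).2)
          (jumps ++ (jmLoop i x y prev terrain).1) terrain := by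
  fun_induction pvCost i x y prev terrain with
  | case1 i x y prev hi m n hs child ih1 ih2 =>
    intro f rest jumps
    rw [jmLoop_eq_some hi hs]
    have hstep : 1 + pvCost 0 m n (prev ++ [[x, y]]) terrain +
        pvCost (i + 1) x y (prev ++ [[x, y]] ++ child.2) terrain + f =
        (pvCost 0 m n (prev ++ [[x, y]]) terrain +
          (pvCost (i + 1) x y (prev ++ [[x, y]] ++ child.2) terrain + f)) + 1 := by omega
    rw [hstep, runB]
    simp only [if_pos hi, hs]
    rw [ih1, ih2]
    simp only [List.append_assoc, List.cons_append, List.nil_append]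
    rfl
  | case2 i x y prev hi hs ih =>
    intro f rest jumps
    rw [jmLoop_eq_none hi hs]
    have hstep : 1 + pvCost (i + 1) x y prev terrain + f =
        (pvCost (i + 1) x y prev terrain + f) + 1 := by omega
    rw [hstep, runB]
    simp only [if_pos hi, hs]
    exact ih f rest jumps
  | case3 i x y prev hi =>
    intro f rest jumps
    rw [jmLoop_eq_stop hi]
    rw [Nat.add_comm 1 f, runB]
    simp only [if_neg hi]
    simp

lemma pvFree_le_256 (prev : List (List Int)) : pvFree prev ≤ 256 := by
  have h := Finset.card_filter_le (Finset.range 16 ×ˢ Finset.range 16)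
    (fun c => [(c.1 : Int), (c.2 : Int)] ∉ prev)
  simpa [pvFree] using h

lemma pvCost_le (i : Nat) (x y : Int) (prev : List (List Int)) (terrain : List (List String)) :
    i ≤ 8 → pvCost i x y prev terrain ≤ (9 - i) * 10 ^ pvFree (prev ++ [[x, y]]) := by
  fun_induction pvCost i x y prev terrain with
  | case1 i x y prev hi m n hs child ih1 ih2 =>
    intro _
    have hspec := pvStep?_some hi hs
    have hF1 : pvFree ((prev ++ [[x, y]]) ++ [[m, n]]) < pvFree (prev ++ [[x, y]]) :=
      pvFree_lt _ hspec.1 hspec.2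
    have hF2 : pvFree ((prev ++ [[x, y]] ++ child.2) ++ [[x, y]]) ≤ pvFree (prev ++ [[x, y]]) := by
      apply pvFree_le_of_subset
      intro a ha
      simp only [List.append_assoc, List.mem_append] at ha ⊢
      tauto
    have h1 := ih1 (by omega)
    have h2 := ih2 (by omega)
    set F := pvFree (prev ++ [[x, y]]) with hFdef
    have hQ1 : 10 ^ pvFree ((prev ++ [[x, y]]) ++ [[m, n]]) ≤ 10 ^ (F - 1) :=
      Nat.pow_le_pow_right (by norm_num) (by omega)
    have hQ2 : 10 ^ pvFree ((prev ++ [[x, y]] ++ child.2) ++ [[x, y]]) ≤ 10 ^ F :=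
      Nat.pow_le_pow_right (by norm_num) hF2
    have hTF : 10 ^ F = 10 * 10 ^ (F - 1) := by
      have hF1' : 1 ≤ F := by omega
      calc 10 ^ F = 10 ^ (1 + (F - 1)) := by congr 1; omega
        _ = 10 * 10 ^ (F - 1) := by rw [pow_add, pow_one]
    have h9i : 9 - i = (8 - i) + 1 := by omega
    rw [h9i, Nat.add_mul, one_mul]
    have hc1 : pvCost 0 m n (prev ++ [[x, y]]) terrain ≤ 9 * 10 ^ (F - 1) := by
      calc pvCost 0 m n (prev ++ [[x, y]]) terrain
          ≤ 9 * 10 ^ pvFree ((prev ++ [[x, y]]) ++ [[m, n]]) := by simpa using h1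
        _ ≤ 9 * 10 ^ (F - 1) := Nat.mul_le_mul_left _ hQ1
    have hc2 : pvCost (i + 1) x y (prev ++ [[x, y]] ++ child.2) terrain ≤ (8 - i) * 10 ^ F := by
      calc pvCost (i + 1) x y (prev ++ [[x, y]] ++ child.2) terrain
          ≤ (9 - (i + 1)) * 10 ^ pvFree ((prev ++ [[x, y]] ++ child.2) ++ [[x, y]]) := h2
        _ ≤ (8 - i) * 10 ^ F := by
            have : 9 - (i + 1) = 8 - i := by omega
            rw [this]; exact Nat.mul_le_mul_left _ hQ2
    have hQpos : 1 ≤ 10 ^ (F - 1) := Nat.one_le_pow _ _ (by norm_num)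
    generalize hA : (8 - i) * 10 ^ F = A at *
    generalize hQ : 10 ^ (F - 1) = Q at *
    omega
  | case2 i x y prev hi hs ih =>
    intro _
    have h1 := ih (by omega)
    have h9i : 9 - i = (8 - i) + 1 := by omega
    have h8i : 9 - (i + 1) = 8 - i := by omega
    rw [h8i] at h1
    rw [h9i, Nat.add_mul, one_mul]
    have hQpos : 1 ≤ 10 ^ pvFree (prev ++ [[x, y]]) := Nat.one_le_pow _ _ (by norm_num)
    generalize hA : (8 - i) * 10 ^ pvFree (prev ++ [[x, y]]) = A at *
    generalize hQ : 10 ^ pvFree (prev ++ [[x, y]]) = Q at *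
    omega
  | case3 i x y prev hi =>
    intro hle
    have : i = 8 := by omega
    subst this
    simpa using Nat.one_le_pow (pvFree (prev ++ [[x, y]])) 10 (by norm_num)

-- ===== VERDICT (by name: the statement is the Claim_ definition above) =====
theorem jumpInfi_spec : Claim_equal_jumpInfi := by
  intro x y prevSpots goal terrain _ _
  unfold Spec_jumpInfi jumpInfi jumpInfi_alt
  have hcost : pvCost 0 x y prevSpots terrain ≤ 9 * 10 ^ 256 := by
    calc pvCost 0 x y prevSpots terrain
        ≤ (9 - 0) * 10 ^ pvFree (prevSpots ++ [[x, y]]) := pvCost_le 0 x y prevSpots terrain (by omega)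
      _ ≤ 9 * 10 ^ 256 := Nat.mul_le_mul_left _
          (Nat.pow_le_pow_right (by norm_num) (pvFree_le_256 _))
  have hfuel : pvFuel = pvCost 0 x y prevSpots terrain + (pvFuel - pvCost 0 x y prevSpots terrain) := by
    unfold pvFuel at *; omega
  rw [hfuel, runB_bridge, runB_empty]
  simp
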